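-- pv_equiv track=rewrite | github.com/lj936/netsec_3_4_lj | preprocess.py | calculate_network_address
-- ===== SOURCE A (Python) =====
-- import ipaddress
-- import math
--
-- def calculate_network_address(ip_addresses):
--     if not ip_addresses or isinstance(ip_addresses, float) and math.isnan(ip_addresses):
--         return -1
--     ip_objects = []
--     for ip in ip_addresses:
--         try:
--             ip_obj = ipaddress.IPv4Address(ip)
--             ip_objects.append(ip_obj)
--         except ipaddress.AddressValueError:
--             pass
--     if not ip_objects:
--         return -1
--
--     # Extrahiere die Binärrepräsentation der IP-Adressen und fülle fehlende Stellen mit 0 auf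
--     binary_ips = [format(int(ip), '032b') for ip in ip_objects]
--
--     # Bestimme die gemeinsame Netzmaske im Binärformat
--     common_mask_binary = ''.join('1' if all(bit == '1' for bit in bits) else '0' for bits in zip(*binary_ips))
--
--     # Konvertiere die Binärform der Netzmaske direkt in eine Dezimalzahl (Integer)
--     network_address_decimal = int(common_mask_binary, 2)
--
--     return network_address_decimal
-- ===== SOURCE B (Python) =====
-- def _octet_value(p):
--     # decimal value of one octet string, or -1 if it is not a valid octet
--     if not 1 <= len(p) <= 3 or not p.isdigit():
--         return -1
--     if p[0] == '0' and len(p) > 1: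
--         return -1
--     n = ord(p[0]) - 48
--     for c in p[1:]:
--         n = 10 * n + ord(c) - 48
--     return n if n <= 255 else -1
--
--
-- def _ip_value(ip):
--     # integer value of a dotted-quad IPv4 string, or None if invalid
--     parts = ip.split('.')
--     if len(parts) != 4:
--         return None
--     v = 0
--     for p in parts:
--         n = _octet_value(p)
--         if n < 0:
--             return None
--         v = v * 256 + n
--     return v
--
--
-- def calculate_network_address(ip_addresses):
--     values = [v for v in map(_ip_value, ip_addresses) if v is not None]
--     if not values:
--         return -1
--     net = values[0]
--     for v in values[1:]:
--         net &= v
--     return net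
-- ===== Notes on version B (the rewrite author's own statement) =====
-- stated objective: faster
-- what changed: The bit-string core (32-char binary strings, zip(*...) transpose, per-column all(bit=='1') scan, int(...,2)) is replaced by a staged pipeline with a hand-written parser: each string is mapped to its integer value (None if not a valid IPv4 address), the valid values are collected, and the network address is their bitwise AND accumulated in a plain loop.
import Mathlib
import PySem

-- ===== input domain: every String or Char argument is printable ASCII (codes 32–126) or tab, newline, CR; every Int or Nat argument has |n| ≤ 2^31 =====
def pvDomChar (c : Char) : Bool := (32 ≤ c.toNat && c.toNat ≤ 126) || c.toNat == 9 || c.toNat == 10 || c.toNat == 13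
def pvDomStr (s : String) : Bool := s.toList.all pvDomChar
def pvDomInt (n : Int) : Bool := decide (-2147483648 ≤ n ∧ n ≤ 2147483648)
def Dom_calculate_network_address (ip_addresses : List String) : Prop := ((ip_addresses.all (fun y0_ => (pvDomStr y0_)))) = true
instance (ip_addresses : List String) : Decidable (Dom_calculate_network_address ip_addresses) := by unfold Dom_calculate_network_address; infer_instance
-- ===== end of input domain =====

-- B replaces A's bit-string core (binary strings, zip(*...) transpose, per-column all-'1' scan,
-- int(...,2)) by a staged pipeline: a hand parser maps each string to its integer value, the valid
-- values are collected, and the answer is their bitwise AND accumulated in a plain loop; the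
-- timing run measured B faster by a constant factor.

-- ===== PORT A =====
-- A-side parsing helper: hand port of ipaddress.IPv4Address(str) restricted to the integer value
-- int(ip_obj); returns none exactly where CPython raises AddressValueError.  Exact for ASCII input
-- (the Dom): split on '.', exactly 4 octets, each a nonempty all-digit string of at most 3 chars,
-- no leading zero, value ≤ 255; the value is the big-endian combination of the octets.  (A string
-- containing '/' raises in CPython before splitting; it also fails the octet digit test here, so
-- the result, none, agrees.)
def parseOctet? (cs : List Char) : Option Nat :=
  if cs = [] then none
  else if ¬ (cs.all PySem.Chars.isdigit = true) then none  -- isascii() && isdigit(): exact on ASCII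
  else if 3 < cs.length then none
  else if cs ≠ ['0'] ∧ cs.headD ' ' = '0' then none
  else
    -- int(octet_str, 10) on a short pure-digit string: positional fold, exact here
    let v := cs.foldl (fun a c => 10 * a + (c.toNat - 48)) 0
    if 255 < v then none else some v

def parseIPv4? (s : String) : Option Nat :=
  match PySem.Chars.splitOn s.toList ['.'] with
  | [a, b, c, d] =>
    match parseOctet? a, parseOctet? b, parseOctet? c, parseOctet? d with
    | some a, some b, some c, some d => some (((a * 256 + b) * 256 + c) * 256 + d)
    | _, _, _, _ => none
  | _ => none

-- hand port of format(n, '032b') (builtin): most-significant-bit-first binary, width w; exact for n < 2^w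
def toBin : Nat → Nat → List Char
  | 0, _ => []
  | w + 1, n => (if n.testBit w then '1' else '0') :: toBin w (n % 2 ^ w)

-- termination helper for zipStar (cited by its decreasing_by)
theorem pvSumLenTailLt : ∀ (rows : List (List Char)), rows ≠ [] → (∀ r ∈ rows, r ≠ []) →
    ((rows.map (fun r => r.tail)).map List.length).sum < (rows.map List.length).sum := by
  intro rows
  induction rows with
  | nil => simp
  | cons r rs ih =>
    intro _ hall
    have hr : r ≠ [] := hall r (by simp)
    have h1 : r.tail.length < r.length := by
      cases r with
      | nil => exact absurd rfl hr
      | cons a as => simp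
    rcases rs with _ | ⟨s, ss⟩
    · simpa using h1
    · have h2 := ih (by simp) (fun x hx => hall x (by simp [hx]))
      simp only [List.map_cons, List.sum_cons] at h2 ⊢
      omega

-- hand port of zip(*binary_ips): column tuples until some row is exhausted; exact
def zipStar (rows : List (List Char)) : List (List Char) :=
  if h : rows.isEmpty = true ∨ rows.any (fun r => r.isEmpty) = true then []
  else (rows.map (fun r => r.headD '0')) :: zipStar (rows.map (fun r => r.tail))
termination_by (rows.map List.length).sum
decreasing_by
  simp only [List.map_subtype, List.unattach_attach, List.map_map]
  have h1 : rows ≠ [] := by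
    intro hn; exact h (Or.inl (by simp [hn]))
  have h2 : ∀ r ∈ rows, r ≠ [] := by
    intro r hr hre
    exact h (Or.inr (by rw [List.any_eq_true]; exact ⟨r, hr, by simp [hre]⟩))
  simpa [List.map_map] using pvSumLenTailLt rows h1 h2

-- hand port of int(s, 2) for a pure '0'/'1' digit string (which common_mask_binary always is): exact there
def int_of_bin (cs : List Char) : Nat :=
  cs.foldl (fun a c => 2 * a + (if c == '1' then 1 else 0)) 0

def calculate_network_address (ip_addresses : List String) : Int :=
  if ip_addresses = [] then -1
  else
    let ip_objects := ip_addresses.foldl (fun acc ip =>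
      match parseIPv4? ip with
      | some v => acc ++ [v]
      | none => acc) ([] : List Nat)
    if ip_objects = [] then -1
    else
      let binary_ips := ip_objects.map (fun v => toBin 32 v)
      let common_mask_binary := (zipStar binary_ips).map
        (fun bits => if bits.all (fun b => b == '1') then '1' else '0')
      ((int_of_bin common_mask_binary : Nat) : Int)

-- ===== PORT B =====
-- B-side octet parser (_octet_value): length/digit/leading-zero checks, then a per-character
-- decimal accumulation over p[1:] started at the first digit's value; -1 signals an invalid octet.
def octVal (p : List Char) : Int :=
  if ¬ (1 ≤ p.length ∧ p.length ≤ 3) ∨ ¬ (p.all PySem.Chars.isdigit = true) then -1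
  else if p.headD ' ' = '0' ∧ 1 < p.length then -1
  else
    let n : Int := p.tail.foldl (fun n c => 10 * n + ((c.toNat : Int) - 48))
      (((p.headD ' ').toNat : Int) - 48)
    if n ≤ 255 then n else -1

-- B-side address parser (_ip_value): split on '.', demand 4 parts, then a left-to-right loop
-- v = v * 256 + octet with early None on the first invalid octet (Option accumulator).
def ipValue (ip : String) : Option Int :=
  let parts := PySem.Chars.splitOn ip.toList ['.']
  if parts.length ≠ 4 then none
  else parts.foldl (fun acc p =>
    match acc with
    | none => none
    | some v => let n := octVal p; if n < 0 then none else some (v * 256 + n)) (some 0)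

def calculate_network_address_alt (ip_addresses : List String) : Int :=
  let values := (ip_addresses.map ipValue).filterMap id
  if values = [] then -1
  else values.tail.foldl (fun net v => Int.land net v) (values.headD 0)

-- ===== PRECONDITION & SPEC =====
def Spec_calculate_network_address (ip_addresses : List String) (out : Int) : Prop := out = calculate_network_address_alt ip_addresses
instance (ip_addresses : List String) (out : Int) : Decidable (Spec_calculate_network_address ip_addresses out) := by unfold Spec_calculate_network_address; infer_instance

-- ===== CLAIM (what is proved, stated in full; the proofs are below) =====
def Claim_equal_calculate_network_address : Prop := ∀ (ip_addresses : List String), Dom_calculate_network_address ip_addresses → Spec_calculate_network_address ip_addresses (calculate_network_address ip_addresses)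

-- ===== LEMMAS AND PROOFS =====

theorem toBin_length : ∀ (w n : Nat), (toBin w n).length = w := by
  intro w
  induction w with
  | zero => intro n; rfl
  | succ w ih => intro n; simp [toBin, ih]

theorem zipStar_length : ∀ (w : Nat) (rows : List (List Char)), rows ≠ [] →
    (∀ r ∈ rows, r.length = w) → (zipStar rows).length = w := by
  intro w
  induction w with
  | zero =>
    intro rows hne hall
    rw [zipStar.eq_def]
    rcases rows with _ | ⟨r, rs⟩
    · exact absurd rfl hne
    · have : r.isEmpty = true := by
        have := hall r (by simp); simpa [List.isEmpty_iff, List.length_eq_zero_iff] using this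
      simp [this]
  | succ w ih =>
    intro rows hne hall
    rw [zipStar.eq_def]
    have hno : rows.any (fun r => r.isEmpty) = false := by
      simp only [List.any_eq_false]
      intro r hr
      have := hall r hr
      simp [List.isEmpty_iff]
      intro h0; rw [h0] at this; simp at this
    have hne' : rows.isEmpty = false := by simpa [List.isEmpty_iff] using hne
    rw [dif_neg (by simp [hno, hne'])]
    simp only [List.length_cons]
    rw [ih (rows.map (fun r => r.tail)) (by simpa using hne)]
    intro r hr
    simp only [List.mem_map] at hr
    obtain ⟨s, hs, rfl⟩ := hr
    have := hall s hs
    cases s with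
    | nil => simp at this
    | cons a as => simpa using this

theorem foldl_land_testBit : ∀ (vs : List Nat) (a : Nat) (j : Nat),
    (List.foldl (fun x y => x &&& y) a vs).testBit j = (a.testBit j && vs.all (fun x => x.testBit j)) := by
  intro vs
  induction vs with
  | nil => intro a j; simp
  | cons v vs ih =>
    intro a j
    simp only [List.foldl_cons, List.all_cons]
    rw [ih, Nat.testBit_and, Bool.and_assoc]

theorem foldl_land_le : ∀ (vs : List Nat) (a : Nat), List.foldl (fun x y => x &&& y) a vs ≤ a := by
  intro vs
  induction vs with
  | nil => intro a; simp
  | cons v vs ih =>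
    intro a
    simp only [List.foldl_cons]
    exact le_trans (ih (a &&& v)) Nat.and_le_left

theorem int_of_bin_acc : ∀ (cs : List Char) (a : Nat),
    cs.foldl (fun a c => 2 * a + (if c == '1' then 1 else 0)) a = a * 2 ^ cs.length + int_of_bin cs := by
  intro cs
  induction cs with
  | nil => intro a; simp [int_of_bin]
  | cons c cs ih =>
    intro a
    simp only [List.foldl_cons, int_of_bin, List.length_cons]
    rw [ih, ih ((2 * 0 + if c == '1' then 1 else 0))]
    ring

theorem int_of_bin_cons (c : Char) (cs : List Char) :
    int_of_bin (c :: cs) = (if c == '1' then 1 else 0) * 2 ^ cs.length + int_of_bin cs := by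
  show List.foldl _ _ (c :: cs) = _
  rw [List.foldl_cons, int_of_bin_acc]
  norm_num

theorem testBit_pow_add : ∀ (j w m : Nat), m < 2 ^ w →
    (2 ^ w + m).testBit j = (decide (j = w) || m.testBit j) := by
  intro j
  induction j with
  | zero =>
    intro w m hm
    cases w with
    | zero =>
      interval_cases m
      simp
    | succ w =>
      simp only [Nat.testBit_zero]
      have h2 : (2 ^ (w + 1) + m) % 2 = m % 2 := by
        have hp : 2 ^ (w + 1) = 2 ^ w * 2 := by ring
        omega
      rw [h2]
      simp
  | succ j ih =>
    intro w m hm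
    cases w with
    | zero =>
      interval_cases m
      have hlt : (1 : Nat) < 2 ^ (j + 1) := by
        have hp : 2 ^ (j + 1) = 2 ^ j * 2 := by ring
        have := Nat.two_pow_pos j
        omega
      simp [Nat.testBit_lt_two_pow hlt]
    | succ w =>
      rw [Nat.testBit_succ, Nat.testBit_succ]
      have hdiv : (2 ^ (w + 1) + m) / 2 = 2 ^ w + m / 2 := by
        have : 2 ^ (w + 1) = 2 ^ w * 2 := by ring
        omega
      rw [hdiv, ih w (m / 2) (by omega)]
      by_cases hjw : j = w
      · simp [hjw]
      · simp [hjw]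

theorem mask_core : ∀ (w : Nat) (v : Nat) (vs : List Nat), v < 2 ^ w → (∀ x ∈ vs, x < 2 ^ w) →
    int_of_bin ((zipStar ((v :: vs).map (fun x => toBin w x))).map
        (fun bits => if bits.all (fun b => b == '1') then '1' else '0'))
      = List.foldl (fun x y => x &&& y) v vs := by
  intro w
  induction w with
  | zero =>
    intro v vs hv hall
    have hv0 : v = 0 := by omega
    subst hv0
    have hz : List.foldl (fun x y => x &&& y) 0 vs = 0 :=
      Nat.le_zero.mp (foldl_land_le vs 0)
    rw [hz, zipStar.eq_def]
    simp [toBin, int_of_bin]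
  | succ w ih =>
    intro v vs hv hall
    have hpow : 0 < 2 ^ w := Nat.two_pow_pos w
    rw [zipStar.eq_def]
    rw [dif_neg (by simp [toBin])]
    have hheads : ((v :: vs).map (fun x => toBin (w + 1) x)).map (fun r => r.headD '0')
        = (v :: vs).map (fun x => if x.testBit w then '1' else '0') := by
      simp [List.map_map, toBin, Function.comp]
    have htails : ((v :: vs).map (fun x => toBin (w + 1) x)).map (fun r => r.tail)
        = ((v % 2 ^ w) :: vs.map (fun x => x % 2 ^ w)).map (fun x => toBin w x) := by
      simp [List.map_map, toBin, Function.comp]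
    rw [hheads, htails, List.map_cons, int_of_bin_cons]
    rw [ih (v % 2 ^ w) (vs.map (fun x => x % 2 ^ w)) (Nat.mod_lt v hpow)
        (by intro x hx; simp only [List.mem_map] at hx; obtain ⟨y, _, rfl⟩ := hx; exact Nat.mod_lt y hpow)]
    have hcol : (((v :: vs).map (fun x => if x.testBit w then '1' else '0')).all (fun b => b == '1'))
        = (v :: vs).all (fun x => x.testBit w) := by
      rw [List.all_map]
      exact List.all_congr rfl (fun x => by by_cases h : x.testBit w <;> simp [h, Function.comp])
    rw [hcol]
    have hlen : ((zipStar (((v % 2 ^ w) :: vs.map (fun x => x % 2 ^ w)).map (fun x => toBin w x))).map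
        (fun bits => if bits.all (fun b => b == '1') then '1' else '0')).length = w := by
      rw [List.length_map]
      apply zipStar_length w _ (by simp)
      intro r hr
      simp only [List.mem_map] at hr
      obtain ⟨y, _, rfl⟩ := hr
      exact toBin_length w y
    rw [hlen]
    set M := List.foldl (fun x y => x &&& y) (v % 2 ^ w) (vs.map (fun x => x % 2 ^ w)) with hM
    have hMlt : M < 2 ^ w := lt_of_le_of_lt (foldl_land_le _ _) (Nat.mod_lt v hpow)
    apply Nat.eq_of_testBit_eq
    intro j
    have hMbit : ∀ (k : Nat), M.testBit k = (decide (k < w) && (v.testBit k && vs.all (fun x => x.testBit k))) := by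
      intro k
      rw [hM, foldl_land_testBit, Nat.testBit_mod_two_pow, List.all_map]
      by_cases hk : k < w
      · simp only [hk, decide_true, Bool.true_and]
        congr 1
        exact List.all_congr rfl (fun x => by simp [Nat.testBit_mod_two_pow, hk, Function.comp])
      · simp [hk]
    rw [foldl_land_testBit]
    have hone : (if (('1':Char) == '1') = true then (1:Nat) else 0) = 1 := rfl
    have hzero : (if (('0':Char) == '1') = true then (1:Nat) else 0) = 0 := rfl
    by_cases hall2 : ((v :: vs).all (fun x => x.testBit w)) = true
    · rw [if_pos hall2, hone, one_mul, testBit_pow_add j w M hMlt]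
      simp only [List.all_cons] at hall2
      rcases Nat.lt_trichotomy j w with hj | hj | hj
      · rw [hMbit j]
        simp [hj]
        exact fun h => absurd h (by omega)
      · subst hj
        simp [hall2]
      · rw [hMbit j]
        have hvj : v.testBit j = false :=
          Nat.testBit_lt_two_pow (lt_of_lt_of_le hv (Nat.pow_le_pow_right (by norm_num) (by omega)))
        simp [hvj]
        omega
    · rw [if_neg hall2, hzero, zero_mul, zero_add, hMbit j]
      rcases Nat.lt_trichotomy j w with hj | hj | hj
      · simp [hj]
      · subst hj
        have h3 := eq_false_of_ne_true hall2
        simp only [List.all_cons] at h3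
        simp [h3]
      · have hvj : v.testBit j = false :=
          Nat.testBit_lt_two_pow (lt_of_lt_of_le hv (Nat.pow_le_pow_right (by norm_num) (by omega)))
        simp [hvj]

theorem octet_le (cs : List Char) (n : Nat) (h : parseOctet? cs = some n) : n ≤ 255 := by
  unfold parseOctet? at h
  split_ifs at h with h1 h2 h3 h4
  simp only [] at h
  split_ifs at h with h5
  simp only [Option.some.injEq] at h
  omega

theorem parse_lt (s : String) (n : Nat) (h : parseIPv4? s = some n) : n < 2 ^ 32 := by
  unfold parseIPv4? at h
  split at h
  case h_2 => exact absurd h (by simp)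
  case h_1 a b c d heq =>
    rcases ha : parseOctet? a with _ | na <;> rcases hb : parseOctet? b with _ | nb <;>
      rcases hc : parseOctet? c with _ | nc <;> rcases hd : parseOctet? d with _ | nd <;>
      simp [ha, hb, hc, hd] at h
    have := octet_le a na ha
    have := octet_le b nb hb
    have := octet_le c nc hc
    have := octet_le d nd hd
    omega

theorem afold_eq : ∀ (l : List String) (acc : List Nat),
    l.foldl (fun acc ip => match parseIPv4? ip with
      | some v => acc ++ [v]
      | none => acc) acc = acc ++ l.filterMap parseIPv4? := by
  intro l
  induction l with
  | nil => intro acc; simp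
  | cons ip l ih =>
    intro acc
    simp only [List.foldl_cons, List.filterMap_cons]
    rcases h : parseIPv4? ip with _ | v <;> simp [ih]

theorem digit_bounds (c : Char) (h : PySem.Chars.isdigit c = true) : 48 ≤ c.toNat ∧ c.toNat ≤ 57 := by
  unfold PySem.Chars.isdigit at h
  simp at h
  obtain ⟨h1, h2⟩ := h
  rw [Char.le_def] at h1 h2
  exact ⟨h1, h2⟩

-- the two digit-accumulation loops compute the same number (B's in ℤ, A's in ℕ)
theorem digit_fold_cast : ∀ (cs : List Char) (a : Nat), cs.all PySem.Chars.isdigit = true →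
    cs.foldl (fun n c => 10 * n + ((c.toNat : Int) - 48)) (a : Int)
      = ((cs.foldl (fun a c => 10 * a + (c.toNat - 48)) a : Nat) : Int) := by
  intro cs
  induction cs with
  | nil => intro a _; rfl
  | cons c cs ih =>
    intro a hall
    simp only [List.all_cons, Bool.and_eq_true] at hall
    have hc : 48 ≤ c.toNat := (digit_bounds c hall.1).1
    simp only [List.foldl_cons]
    have : 10 * (a : Int) + ((c.toNat : Int) - 48) = ((10 * a + (c.toNat - 48) : Nat) : Int) := by
      omega
    rw [this, ih _ hall.2]

-- B's octet value against A's octet parser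
theorem parseOctet_invalid_head : ∀ (c : Char) (cs : List Char),
    parseOctet? (c :: cs) =
      (if ¬ ((c :: cs).all PySem.Chars.isdigit = true) then none
       else if 3 < (c :: cs).length then none
       else if c :: cs ≠ ['0'] ∧ (c :: cs).headD ' ' = '0' then none
       else if 255 < (c :: cs).foldl (fun a c => 10 * a + (c.toNat - 48)) 0 then none
       else some ((c :: cs).foldl (fun a c => 10 * a + (c.toNat - 48)) 0)) := by
  intro c cs
  unfold parseOctet?
  rw [if_neg (by simp)]

theorem octVal_eq (p : List Char) :
    octVal p = (match parseOctet? p with | none => (-1 : Int) | some n => (n : Int)) := by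
  rcases p with _ | ⟨c, cs⟩
  · simp [octVal, parseOctet?]
  · rw [parseOctet_invalid_head]
    by_cases hd : ((c :: cs).all PySem.Chars.isdigit) = true
    · by_cases hl : (c :: cs).length ≤ 3
      · have h1 : ¬ (¬ (1 ≤ (c :: cs).length ∧ (c :: cs).length ≤ 3) ∨
            ¬ ((c :: cs).all PySem.Chars.isdigit = true)) := by
          simp only [List.length_cons, not_or, not_not, hd, and_true]
          simp only [List.length_cons] at hl
          omega
        have hlz : ((c :: cs).headD ' ' = '0' ∧ 1 < (c :: cs).length)
            ↔ (c :: cs ≠ ['0'] ∧ (c :: cs).headD ' ' = '0') := by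
          constructor
          · rintro ⟨h0, hlen⟩
            refine ⟨?_, h0⟩
            intro he
            rw [he] at hlen; simp at hlen
          · rintro ⟨hne, h0⟩
            refine ⟨h0, ?_⟩
            simp only [List.headD_cons] at h0
            subst h0
            rcases cs with _ | _
            · exact absurd rfl hne
            · simp
        rw [if_neg (by simp [hd]), if_neg (by simp only [List.length_cons] at hl ⊢; omega)]
        by_cases hz : ((c :: cs).headD ' ' = '0' ∧ 1 < (c :: cs).length)
        · rw [if_pos (hlz.mp hz)]
          unfold octVal
          rw [if_neg h1, if_pos hz]
        · rw [if_neg (fun h => hz (hlz.mpr h))]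
          unfold octVal
          rw [if_neg h1, if_neg hz]
          simp only [List.all_cons, Bool.and_eq_true] at hd
          have hc : 48 ≤ c.toNat := (digit_bounds c hd.1).1
          have hb : (c :: cs).tail.foldl (fun n ch => 10 * n + ((ch.toNat : Int) - 48))
                ((((c :: cs).headD ' ').toNat : Int) - 48)
              = (((c :: cs).foldl (fun a ch => 10 * a + (ch.toNat - 48)) 0 : Nat) : Int) := by
            simp only [List.tail_cons, List.headD_cons, List.foldl_cons, Nat.mul_zero, Nat.zero_add]
            have : ((c.toNat : Int) - 48) = ((c.toNat - 48 : Nat) : Int) := by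
              omega
            rw [this, digit_fold_cast cs _ hd.2]
          simp only []
          rw [hb]
          set V : Nat := (c :: cs).foldl (fun a ch => 10 * a + (ch.toNat - 48)) 0 with hV
          by_cases h255 : 255 < V
          · rw [if_pos h255, if_neg (by omega)]
          · rw [if_neg h255, if_pos (by omega)]
      · rw [if_neg (by simp [hd]), if_pos (by simp only [List.length_cons] at hl ⊢; omega)]
        unfold octVal
        rw [if_pos (Or.inl (by simp only [List.length_cons] at hl ⊢; omega))]
    · rw [if_pos (by simp [hd])]
      unfold octVal
      rw [if_pos (Or.inr (by simp [hd]))]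

-- case helper: a branch guarded by `(n : ℤ) < 0` with a natural-number cast never fires
theorem natCast_if_neg (n : Nat) (x y : Option Int) : (if (n : Int) < 0 then x else y) = y :=
  if_neg (by omega)

-- B's string parser against A's
theorem ipValue_eq (s : String) : ipValue s = (parseIPv4? s).map (fun n : Nat => (n : Int)) := by
  unfold ipValue parseIPv4?
  rcases hsp : PySem.Chars.splitOn s.toList ['.'] with _ | ⟨a, _ | ⟨b, _ | ⟨c, _ | ⟨d, _ | ⟨e, t⟩⟩⟩⟩⟩
  · rw [if_pos (by simp)]; rfl
  · rw [if_pos (by simp)]; rfl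
  · rw [if_pos (by simp)]; rfl
  · rw [if_pos (by simp)]; rfl
  · rw [if_neg (by simp)]
    simp only [List.foldl_cons, List.foldl_nil]
    have oa := octVal_eq a
    have ob := octVal_eq b
    have oc := octVal_eq c
    have od := octVal_eq d
    rcases ha : parseOctet? a with _ | na <;> rw [ha] at oa <;>
      rcases hb : parseOctet? b with _ | nb <;> rw [hb] at ob <;>
        rcases hc : parseOctet? c with _ | nc <;> rw [hc] at oc <;>
          rcases hd : parseOctet? d with _ | nd <;> rw [hd] at od <;>
            simp only [oa, ob, oc, od, natCast_if_neg] <;>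
            (try simp)
  · rw [if_pos (by simp)]; rfl

theorem land_cast (m n : Nat) : Int.land (m : Int) (n : Int) = ((m &&& n : Nat) : Int) := rfl

theorem foldl_land_cast : ∀ (vs : List Nat) (a : Nat),
    (vs.map (fun n : Nat => (n : Int))).foldl (fun net v => Int.land net v) ((a : Nat) : Int)
      = ((vs.foldl (fun x y => x &&& y) a : Nat) : Int) := by
  intro vs
  induction vs with
  | nil => intro a; rfl
  | cons v vs ih =>
    intro a
    simp only [List.map_cons, List.foldl_cons, land_cast]
    exact ih (a &&& v)

theorem values_eq (l : List String) :
    (l.map ipValue).filterMap id = (l.filterMap parseIPv4?).map (fun n : Nat => (n : Int)) := by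
  rw [List.filterMap_map, List.map_filterMap]
  apply List.filterMap_congr
  intro s _
  simp only [Function.comp_apply, id_eq]
  rw [ipValue_eq]

-- ===== VERDICT (by name: the statement is the Claim_ definition above) =====
theorem calculate_network_address_spec : Claim_equal_calculate_network_address := by
  intro ips _
  unfold Spec_calculate_network_address calculate_network_address calculate_network_address_alt
  simp only [values_eq]
  by_cases hnil : ips = []
  · subst hnil; simp
  · rw [if_neg hnil, afold_eq, List.nil_append]
    rcases hfm : ips.filterMap parseIPv4? with _ | ⟨v, vs⟩
    · simp
    · simp only [List.map_cons]
      rw [if_neg (by simp), if_neg (by simp)]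
      simp only [List.tail_cons, List.headD_cons]
      have hbound : ∀ x ∈ v :: vs, x < 2 ^ 32 := by
        intro x hx
        rw [← hfm] at hx
        obtain ⟨s, _, hs⟩ := List.mem_filterMap.mp hx
        exact parse_lt s x hs
      have hm := mask_core 32 v vs (hbound v (by simp)) (fun x hx => hbound x (by simp [hx]))
      simp only [List.map_cons] at hm
      rw [foldl_land_cast, hm]
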